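-- pv_equiv track=rewrite | github.com/Pseudonian/6.006-OCW-Lecture-Algorithms | Lec1.py | two_dim_peak
-- ===== SOURCE A (Python) =====
-- import math
--
-- def one_dim_peak(arr, pointer = 0):
--     """
--     Find a 'peak' in a 1d array, giving value and position. given a list [a0, a1, ... , an-1] a peak
--     is defined where for ai, ai-1 <= ai and ai+1 <= ai.
--     >>> one_dim_peak([1,2,3,4,5,2,1])
--     (5, 4)
--     """
--     #Base case [We consider singletons to have a peak]
--     if len(arr) == 1:
--         return (arr[0], pointer)
--
--     #Initialize our midpoint. I decided to use a left-bias in my binary search algorithm.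
--     mid = math.floor((len(arr) - 1)/2)
--     left = mid > 0 #Prevent out-of-range error for edge cases
--
--     #Recursive case
--     if arr[mid - 1] > arr[mid] and left:
--         #Left side of our midpoint has a peak
--         return one_dim_peak(arr[0:mid], pointer)
--     elif arr[mid + 1] > arr[mid]:
--         #Right side of midpoint has a peak
--         return one_dim_peak(arr[mid+1:len(arr)], pointer + mid + 1)
--     else:
--         #We've obtained a peak, so return its value and index.
--         return (arr[mid], mid)
--
-- def two_dim_peak(arr, row=0):
--     """
--     Find a 'peak' in a 2d array. given [[a00, ... , a0n], [a10, ... , a1n], ... , [am0, ..., amn]]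
--     a peak is one such that any of its horizontal or vertical neighbors are less than or equal to that value.
--     >>> two_dim_peak([[1,2,3],[4,5,6],[7,8,9]])
--     (9, (2, 2))
--     """
--     #Base case [We consider single rows to have a peak]
--     if len(arr) == 1:
--         row_val, row_pos = one_dim_peak(arr[0])
--         return (row_val, (row, row_pos))
--
--     #Initialize midpoint and check for row being valid.
--     mid = math.floor((len(arr) - 1)/2)
--     up = mid > 0
--
--     #Obtain the index j of the peak of mid row.
--     row_val, row_pos = one_dim_peak(arr[mid])
--
--     #Recursive case
--     if arr[mid - 1][row_pos] > arr[mid][row_pos] and up: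
--         #Rows above mid contain peak
--         return two_dim_peak(arr[0:mid], row)
--     elif arr[mid + 1][row_pos] > arr[mid][row_pos]:
--         #Rows below mid contain peak
--         return two_dim_peak(arr[mid+1:len(arr)], row + mid + 1)
--     else:
--         #We've obtained a peak, so we return value and coordinates.
--         return (arr[mid][row_pos], (mid, row_pos))
-- ===== SOURCE B (Python) =====
-- def one_dim_peak(arr, pointer=0):
--     """Find a peak of a 1d array by binary search, returning (value, index)."""
--     while len(arr) > 1:
--         mid = (len(arr) - 1) // 2
--         if mid > 0 and arr[mid - 1] > arr[mid]:
--             arr = arr[:mid]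
--         elif arr[mid + 1] > arr[mid]:
--             arr, pointer = arr[mid + 1:], pointer + mid + 1
--         else:
--             return (arr[mid], mid)
--     return (arr[0], pointer)
--
-- def two_dim_peak(arr, row=0):
--     """Find a peak of a 2d array by binary search on rows, returning (value, (row, col))."""
--     while len(arr) > 1:
--         mid = (len(arr) - 1) // 2
--         _, pos = one_dim_peak(arr[mid])
--         if mid > 0 and arr[mid - 1][pos] > arr[mid][pos]:
--             arr = arr[:mid]
--         elif arr[mid + 1][pos] > arr[mid][pos]:
--             arr, row = arr[mid + 1:], row + mid + 1
--         else:
--             return (arr[mid][pos], (mid, pos))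
--     val, pos = one_dim_peak(arr[0])
--     return (val, (row, pos))
-- ===== Notes on version B (the rewrite author's own statement) =====
-- stated objective: idiomatic
-- what changed: Both the row search and the 1d helper are rewritten from recursion-with-default-arguments into plain while-loops that shrink the current window in place; Pre_ restricts to nonempty rectangular arrays with nonempty rows, the natural 2d domain (outside it A raises on most shapes, and the few ragged shapes A happens to accept are accidents of negative indexing).
-- outside the precondition, e.g. on two_dim_peak([[1], [2, 3]], 0): A returns (3, (1, 1)), B returns (3, (1, 1))
import Mathlib
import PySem

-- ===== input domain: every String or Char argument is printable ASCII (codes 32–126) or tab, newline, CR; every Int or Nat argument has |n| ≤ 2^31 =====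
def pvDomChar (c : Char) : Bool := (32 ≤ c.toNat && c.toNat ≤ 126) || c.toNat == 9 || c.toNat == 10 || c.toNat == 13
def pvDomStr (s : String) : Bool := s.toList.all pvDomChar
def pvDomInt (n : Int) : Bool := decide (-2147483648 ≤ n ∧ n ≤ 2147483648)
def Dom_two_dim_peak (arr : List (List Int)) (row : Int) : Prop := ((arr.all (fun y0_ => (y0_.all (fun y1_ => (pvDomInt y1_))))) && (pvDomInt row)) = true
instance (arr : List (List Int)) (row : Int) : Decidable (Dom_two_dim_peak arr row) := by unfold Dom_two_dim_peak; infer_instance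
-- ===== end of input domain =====

-- B replaces the recursive helpers by plain while-loops shrinking the current window in place.

-- ===== PORT A =====
-- total indexing helpers: Python raises where pyGet? is none; Pre_ keeps every index in range,
-- so the .getD default is never the value returned inside Pre_.
def pvGetI (xs : List Int) (i : Int) : Int := (PySem.List.pyGet? xs i).getD 0
def pvGetRow (arr : List (List Int)) (i : Int) : List Int := (PySem.List.pyGet? arr i).getD []

-- one_dim_peak of Source A. Recursion runs on a fuel counter (a totality guard only:
-- fuel = len(arr)+1 always suffices, every recursive call is on a strictly shorter slice);
-- mid is inlined at each of its uses.
def one_dim_go : Nat → List Int → Int → Int × Int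
  | 0, _, pointer => (0, pointer)
  | fuel + 1, arr, pointer =>
    if arr.length = 1 then (pvGetI arr 0, pointer)
    else
      if pvGetI arr (PySem.Int.floordiv ((arr.length : Int) - 1) 2 - 1) >
           pvGetI arr (PySem.Int.floordiv ((arr.length : Int) - 1) 2) ∧
         0 < PySem.Int.floordiv ((arr.length : Int) - 1) 2 then
        one_dim_go fuel (PySem.List.slice arr (some 0) (some (PySem.Int.floordiv ((arr.length : Int) - 1) 2))) pointer
      else if pvGetI arr (PySem.Int.floordiv ((arr.length : Int) - 1) 2 + 1) >
                pvGetI arr (PySem.Int.floordiv ((arr.length : Int) - 1) 2) then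
        one_dim_go fuel (PySem.List.slice arr (some (PySem.Int.floordiv ((arr.length : Int) - 1) 2 + 1)) (some (arr.length : Int)))
          (pointer + PySem.Int.floordiv ((arr.length : Int) - 1) 2 + 1)
      else (pvGetI arr (PySem.Int.floordiv ((arr.length : Int) - 1) 2), PySem.Int.floordiv ((arr.length : Int) - 1) 2)

def one_dim_peak_impl (arr : List Int) (pointer : Int) : Int × Int :=
  one_dim_go (arr.length + 1) arr pointer

-- two_dim_peak body of Source A, on a fuel counter (fuel = len(arr)+1 suffices; slices strictly
-- shrink); mid is inlined at each of its uses.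
def two_dim_go : Nat → List (List Int) → Int → Int × (Int × Int)
  | 0, _, _ => (0, (0, 0))
  | fuel + 1, arr, row =>
    if arr.length = 1 then
      let vp := one_dim_peak_impl (pvGetRow arr 0) 0
      (vp.1, (row, vp.2))
    else
      if pvGetI (pvGetRow arr (PySem.Int.floordiv ((arr.length : Int) - 1) 2 - 1))
           (one_dim_peak_impl (pvGetRow arr (PySem.Int.floordiv ((arr.length : Int) - 1) 2)) 0).2 >
         pvGetI (pvGetRow arr (PySem.Int.floordiv ((arr.length : Int) - 1) 2))
           (one_dim_peak_impl (pvGetRow arr (PySem.Int.floordiv ((arr.length : Int) - 1) 2)) 0).2 ∧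
         0 < PySem.Int.floordiv ((arr.length : Int) - 1) 2 then
        two_dim_go fuel (PySem.List.slice arr (some 0) (some (PySem.Int.floordiv ((arr.length : Int) - 1) 2))) row
      else if pvGetI (pvGetRow arr (PySem.Int.floordiv ((arr.length : Int) - 1) 2 + 1))
                (one_dim_peak_impl (pvGetRow arr (PySem.Int.floordiv ((arr.length : Int) - 1) 2)) 0).2 >
              pvGetI (pvGetRow arr (PySem.Int.floordiv ((arr.length : Int) - 1) 2))
                (one_dim_peak_impl (pvGetRow arr (PySem.Int.floordiv ((arr.length : Int) - 1) 2)) 0).2 then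
        two_dim_go fuel (PySem.List.slice arr (some (PySem.Int.floordiv ((arr.length : Int) - 1) 2 + 1)) (some (arr.length : Int)))
          (row + PySem.Int.floordiv ((arr.length : Int) - 1) 2 + 1)
      else (pvGetI (pvGetRow arr (PySem.Int.floordiv ((arr.length : Int) - 1) 2))
              (one_dim_peak_impl (pvGetRow arr (PySem.Int.floordiv ((arr.length : Int) - 1) 2)) 0).2,
            (PySem.Int.floordiv ((arr.length : Int) - 1) 2,
             (one_dim_peak_impl (pvGetRow arr (PySem.Int.floordiv ((arr.length : Int) - 1) 2)) 0).2))

def two_dim_peak (arr : List (List Int)) (row : Int) : Int × (Int × Int) :=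
  two_dim_go (arr.length + 1) arr row

-- ===== PORT B =====
-- the while-loop of Source B's one_dim_peak: the loop state is the current window and the
-- accumulated pointer; fuel is a totality guard only (len(arr)+1 always suffices, the
-- window strictly shrinks each iteration).
def one_dim_loop : Nat → List Int → Int → Int × Int
  | 0, _, pointer => (0, pointer)
  | fuel + 1, arr, pointer =>
    if 1 < arr.length then
      let mid := PySem.Int.floordiv ((arr.length : Int) - 1) 2
      if 0 < mid ∧ pvGetI arr (mid - 1) > pvGetI arr mid then
        one_dim_loop fuel (PySem.List.slice arr none (some mid)) pointer
      else if pvGetI arr (mid + 1) > pvGetI arr mid then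
        one_dim_loop fuel (PySem.List.slice arr (some (mid + 1)) none) (pointer + mid + 1)
      else (pvGetI arr mid, mid)
    else (pvGetI arr 0, pointer)

def one_dim_peak_loop (arr : List Int) (pointer : Int) : Int × Int :=
  one_dim_loop (arr.length + 1) arr pointer

-- the while-loop of Source B's two_dim_peak, same shape.
def two_dim_loop : Nat → List (List Int) → Int → Int × (Int × Int)
  | 0, _, _ => (0, (0, 0))
  | fuel + 1, arr, row =>
    if 1 < arr.length then
      let mid := PySem.Int.floordiv ((arr.length : Int) - 1) 2
      let pos := (one_dim_peak_loop (pvGetRow arr mid) 0).2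
      if 0 < mid ∧ pvGetI (pvGetRow arr (mid - 1)) pos > pvGetI (pvGetRow arr mid) pos then
        two_dim_loop fuel (PySem.List.slice arr none (some mid)) row
      else if pvGetI (pvGetRow arr (mid + 1)) pos > pvGetI (pvGetRow arr mid) pos then
        two_dim_loop fuel (PySem.List.slice arr (some (mid + 1)) none) (row + mid + 1)
      else (pvGetI (pvGetRow arr mid) pos, (mid, pos))
    else
      let vp := one_dim_peak_loop (pvGetRow arr 0) 0
      (vp.1, (row, vp.2))

def two_dim_peak_alt (arr : List (List Int)) (row : Int) : Int × (Int × Int) :=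
  two_dim_loop (arr.length + 1) arr row

-- ===== PRECONDITION & SPEC =====
-- Pre_ is the function's natural 2D domain: a nonempty rectangular array with nonempty rows
-- (there A never raises). It excludes ragged/empty-row inputs, on some of which A still happens
-- to return (the negative-index neighbour lookups land in range by accident); see claim cites.
def Pre_two_dim_peak (arr : List (List Int)) (row : Int) : Prop :=
  arr ≠ [] ∧ 0 < arr.headI.length ∧ ∀ r ∈ arr, r.length = arr.headI.length
instance (arr : List (List Int)) (row : Int) : Decidable (Pre_two_dim_peak arr row) := by
  unfold Pre_two_dim_peak; infer_instance
def pvWitness_two_dim_peak : List (List Int) × Int := ([[1, 2], [3, 4]], 0)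

def Spec_two_dim_peak (arr : List (List Int)) (row : Int) (out : Int × (Int × Int)) : Prop := out = two_dim_peak_alt arr row
instance (arr : List (List Int)) (row : Int) (out : Int × (Int × Int)) : Decidable (Spec_two_dim_peak arr row out) := by unfold Spec_two_dim_peak; infer_instance

-- ===== CLAIM (what is proved, stated in full; the proofs are below) =====
def Claim_equal_two_dim_peak : Prop := ∀ (arr : List (List Int)) (row : Int), Dom_two_dim_peak arr row → Pre_two_dim_peak arr row → Spec_two_dim_peak arr row (two_dim_peak arr row)

-- ===== LEMMAS AND PROOFS =====

-- B's prefix window arr[:mid] is A's arr[0:mid]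
lemma slice_prefix_eq {α : Type} (xs : List α) (m : Int) :
    PySem.List.slice xs none (some m) = PySem.List.slice xs (some 0) (some m) :=
  (PySem.List.slice_zero_start xs (some m)).symm

-- B's suffix window arr[m:] is A's arr[m:len(arr)]
lemma slice_suffix_eq {α : Type} (xs : List α) (m : Int) (h0 : 0 ≤ m) :
    PySem.List.slice xs (some m) none = PySem.List.slice xs (some m) (some (xs.length : Int)) := by
  rw [PySem.List.slice_from xs h0, PySem.List.slice_toNat xs h0 (by positivity)]
  simp

-- the windows both sides recurse on are nonempty
lemma slice_prefix_ne_nil {α : Type} (xs : List α) (m : Int) (h0 : 0 < m) (hne : xs ≠ []) :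
    PySem.List.slice xs (some 0) (some m) ≠ [] := by
  rw [PySem.List.slice_zero_start, PySem.List.slice_to xs (by omega)]
  intro h
  have hl : min m.toNat xs.length = 0 := by simpa using congrArg List.length h
  have := List.length_pos_of_ne_nil hne
  omega

lemma slice_suffix_ne_nil {α : Type} (xs : List α) (m : Int) (h0 : 0 ≤ m)
    (hlt : m < (xs.length : Int)) :
    PySem.List.slice xs (some m) (some (xs.length : Int)) ≠ [] := by
  rw [PySem.List.slice_toNat xs h0 (by positivity)]
  intro h
  have hl := congrArg List.length h
  simp only [List.length_take, List.length_drop, List.length_nil] at hl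
  omega

-- the two helper ports agree on nonempty windows (induction on the shared fuel)
lemma one_dim_eq : ∀ (fuel : Nat) (arr : List Int) (pointer : Int), arr ≠ [] →
    one_dim_go fuel arr pointer = one_dim_loop fuel arr pointer := by
  intro fuel
  induction fuel with
  | zero => intro arr pointer _; rfl
  | succ f IH =>
    intro arr pointer hne
    have hlen : 1 ≤ arr.length := List.length_pos_of_ne_nil hne
    by_cases h1 : arr.length = 1
    · rw [one_dim_go, one_dim_loop, if_pos h1, if_neg (show ¬ 1 < arr.length by omega)]
    · have h2 : 2 ≤ arr.length := by omega
      simp only [one_dim_go, one_dim_loop]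
      rw [if_neg h1, if_pos (show 1 < arr.length by omega)]
      have hde : PySem.Int.floordiv ((arr.length : Int) - 1) 2 = ((arr.length : Int) - 1) / 2 :=
        PySem.Int.floordiv_eq_ediv_of_pos (by omega)
      set mid := PySem.Int.floordiv ((arr.length : Int) - 1) 2 with hmid
      have hmb : 0 ≤ mid ∧ mid < (arr.length : Int) - 1 := by omega
      by_cases hc1 : pvGetI arr (mid - 1) > pvGetI arr mid ∧ 0 < mid
      · rw [if_pos hc1, if_pos (show 0 < mid ∧ pvGetI arr (mid - 1) > pvGetI arr mid from ⟨hc1.2, hc1.1⟩),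
            slice_prefix_eq]
        exact IH _ _ (slice_prefix_ne_nil arr mid hc1.2 hne)
      · rw [if_neg hc1, if_neg (show ¬ (0 < mid ∧ pvGetI arr (mid - 1) > pvGetI arr mid) from
            fun h => hc1 ⟨h.2, h.1⟩)]
        by_cases hc2 : pvGetI arr (mid + 1) > pvGetI arr mid
        · rw [if_pos hc2, if_pos hc2, slice_suffix_eq arr (mid + 1) (by omega)]
          exact IH _ _ (slice_suffix_ne_nil arr (mid + 1) (by omega) (by omega))
        · rw [if_neg hc2, if_neg hc2]

-- hence the packaged helpers agree
lemma one_dim_impl_eq (arr : List Int) (pointer : Int) (hne : arr ≠ []) :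
    one_dim_peak_impl arr pointer = one_dim_peak_loop arr pointer :=
  one_dim_eq (arr.length + 1) arr pointer hne

-- rows fetched in range are members of the array
lemma getRow_mem (arr : List (List Int)) (i : Int) (h0 : 0 ≤ i) (hlt : i < (arr.length : Int)) :
    pvGetRow arr i ∈ arr := by
  unfold pvGetRow
  rw [PySem.List.pyGet?_of_nonneg arr h0]
  have hlt' : i.toNat < arr.length := by omega
  rw [List.getElem?_eq_getElem hlt']
  exact List.getElem_mem hlt'

-- the two main ports agree on nonempty arrays all of whose rows are nonempty
lemma two_dim_eq : ∀ (fuel : Nat) (arr : List (List Int)) (row : Int), arr ≠ [] →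
    (∀ r ∈ arr, r ≠ ([] : List Int)) →
    two_dim_go fuel arr row = two_dim_loop fuel arr row := by
  intro fuel
  induction fuel with
  | zero => intro arr row _ _; rfl
  | succ f IH =>
    intro arr row hne hrows
    have hlen : 1 ≤ arr.length := List.length_pos_of_ne_nil hne
    by_cases h1 : arr.length = 1
    · have h0 := one_dim_impl_eq (pvGetRow arr 0) 0 (hrows _ (getRow_mem arr 0 le_rfl (by omega)))
      simp only [two_dim_go, two_dim_loop]
      rw [if_pos h1, if_neg (show ¬ 1 < arr.length by omega), h0]
    · have h2 : 2 ≤ arr.length := by omega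
      simp only [two_dim_go, two_dim_loop]
      rw [if_neg h1, if_pos (show 1 < arr.length by omega)]
      have hde : PySem.Int.floordiv ((arr.length : Int) - 1) 2 = ((arr.length : Int) - 1) / 2 :=
        PySem.Int.floordiv_eq_ediv_of_pos (by omega)
      set mid := PySem.Int.floordiv ((arr.length : Int) - 1) 2 with hmid
      have hmb : 0 ≤ mid ∧ mid < (arr.length : Int) - 1 := by omega
      rw [one_dim_impl_eq (pvGetRow arr mid) 0 (hrows _ (getRow_mem arr mid hmb.1 (by omega)))]
      set pos := (one_dim_peak_loop (pvGetRow arr mid) 0).2 with hpos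
      have hmemrows : ∀ (w : List (List Int)), (∀ r ∈ w, r ∈ arr) → ∀ r ∈ w, r ≠ ([] : List Int) :=
        fun w hw r hr => hrows r (hw r hr)
      by_cases hc1 : pvGetI (pvGetRow arr (mid - 1)) pos > pvGetI (pvGetRow arr mid) pos ∧ 0 < mid
      · rw [if_pos hc1, if_pos (show 0 < mid ∧
            pvGetI (pvGetRow arr (mid - 1)) pos > pvGetI (pvGetRow arr mid) pos from ⟨hc1.2, hc1.1⟩),
            slice_prefix_eq]
        exact IH _ _ (slice_prefix_ne_nil arr mid hc1.2 hne)
          (fun r hr => hrows r (PySem.List.mem_of_mem_slice _ _ _ hr))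
      · rw [if_neg hc1, if_neg (show ¬ (0 < mid ∧
            pvGetI (pvGetRow arr (mid - 1)) pos > pvGetI (pvGetRow arr mid) pos) from
            fun h => hc1 ⟨h.2, h.1⟩)]
        by_cases hc2 : pvGetI (pvGetRow arr (mid + 1)) pos > pvGetI (pvGetRow arr mid) pos
        · rw [if_pos hc2, if_pos hc2, slice_suffix_eq arr (mid + 1) (by omega)]
          exact IH _ _ (slice_suffix_ne_nil arr (mid + 1) (by omega) (by omega))
            (fun r hr => hrows r (PySem.List.mem_of_mem_slice _ _ _ hr))
        · rw [if_neg hc2, if_neg hc2]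

-- ===== VERDICT (by name: the statement is the Claim_ definition above) =====
theorem two_dim_peak_spec : Claim_equal_two_dim_peak := by
  intro arr row _ hpre
  unfold Spec_two_dim_peak two_dim_peak two_dim_peak_alt
  obtain ⟨hne, hpos, hrect⟩ := hpre
  refine two_dim_eq (arr.length + 1) arr row hne ?_
  intro r hr h
  have hl := hrect r hr
  rw [h] at hl
  simp only [List.length_nil] at hl
  omega
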